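-- pv_equiv track=rewrite | github.com/CakeWithSteak/quantum-project | quantum-demo/src/utils.py | make_basis
-- ===== SOURCE A (Python) =====
-- def make_basis(restrictions):
--     basis = []
--     bits_n = len(restrictions)
--
--     for input_index in range(2 ** bits_n):
--         valid = True
--         for bit_index in range(bits_n):
--             restriction = restrictions[bit_index]
--             if restriction != -1 and not bit_equal(input_index, bit_index, restriction):
--                 valid = False
--                 break
--
--         if valid:
--             basis.append(input_index)
--
--     return basis
--
-- def bit_equal(number, index, target):
--     return (number >> index) & 1 == target
-- ===== SOURCE B (Python) =====
-- def make_basis(restrictions):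
--     # Recursive construction: only valid basis states are ever generated,
--     # O(n * output) instead of scanning all 2**n candidates.
--     if not restrictions:
--         return [0]
--     head, rest = restrictions[0], restrictions[1:]
--     if head == -1:
--         bits = [0, 1]
--     elif head == 0 or head == 1:
--         bits = [head]
--     else:
--         bits = []
--     return [2 * q + b for q in make_basis(rest) for b in bits]
-- ===== Notes on version B (the rewrite author's own statement) =====
-- stated objective: faster
-- what changed: A scans all 2**n candidate integers and tests every bit of each; B builds the valid numbers directly by recursion on the restriction list (low bit first), so only valid outputs are ever generated.
import Mathlib
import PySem

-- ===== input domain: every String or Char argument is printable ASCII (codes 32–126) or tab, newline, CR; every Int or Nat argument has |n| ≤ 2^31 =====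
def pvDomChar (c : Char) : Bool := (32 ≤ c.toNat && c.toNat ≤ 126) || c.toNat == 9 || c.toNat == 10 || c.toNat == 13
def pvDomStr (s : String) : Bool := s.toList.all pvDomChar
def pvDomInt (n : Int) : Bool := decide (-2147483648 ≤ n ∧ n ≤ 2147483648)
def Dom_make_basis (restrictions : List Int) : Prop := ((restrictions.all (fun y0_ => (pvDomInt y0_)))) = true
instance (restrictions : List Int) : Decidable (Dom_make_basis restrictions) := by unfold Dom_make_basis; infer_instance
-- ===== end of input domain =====

-- B replaces A's scan of all 2^n candidates by a recursion on the restriction list that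
-- generates only the valid numbers (objective: faster, asymptotically).

-- ===== PORT A =====
-- (number >> index) & 1 == target ; index is always a nonnegative loop counter here
def bit_equal (number index target : Int) : Bool :=
  (PySem.Int.band (number >>> index.toNat) 1) == target

-- the inner 'for bit_index in range(bits_n)' loop with its break, as structural recursion
-- over the index list; the index is always in range, so pyGetD's default is never used
def make_basis_check (restrictions : List Int) (input_index : Int) : List Int → Bool
  | [] => true
  | bit_index :: rest =>
    let restriction := PySem.List.pyGetD restrictions bit_index 0
    if (restriction != -1) && !(bit_equal input_index bit_index restriction) then false
    else make_basis_check restrictions input_index rest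

def make_basis (restrictions : List Int) : List Int :=
  (PySem.List.pyRange 0 ((2 : Int) ^ restrictions.length) 1).foldl
    (fun basis input_index =>
      if make_basis_check restrictions input_index
           (PySem.List.pyRange 0 (restrictions.length : Int) 1)
      then basis ++ [input_index] else basis) []

-- ===== PORT B =====
def make_basis_alt : List Int → List Int
  | [] => [0]
  | head :: rest =>
    let bits : List Int :=
      if head == -1 then [0, 1] else if head == 0 || head == 1 then [head] else []
    (make_basis_alt rest).flatMap (fun q => bits.map (fun b => 2 * q + b))

-- ===== PRECONDITION & SPEC =====
def Spec_make_basis (restrictions : List Int) (out : List Int) : Prop := out = make_basis_alt restrictions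
instance (restrictions : List Int) (out : List Int) : Decidable (Spec_make_basis restrictions out) := by unfold Spec_make_basis; infer_instance

-- ===== CLAIM (what is proved, stated in full; the proofs are below) =====
def Claim_equal_make_basis : Prop := ∀ (restrictions : List Int), Dom_make_basis restrictions → Spec_make_basis restrictions (make_basis restrictions)

-- ===== LEMMAS AND PROOFS =====

-- bit-restriction test, structurally on the list (low bit first)
def okN : List Int → Nat → Bool
  | [], _ => true
  | r :: rs, m => (r == -1 || ((m % 2 : Nat) : Int) == r) && okN rs (m / 2)

theorem if_bool_lemma (p b c : Bool) : (if (!p) && !b then false else c) = ((p || b) && c) := by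
  cases p <;> cases b <;> simp

theorem check_spec (full : List Int) (n : Nat) : ∀ (k m : Nat), full.length - k = n →
    make_basis_check full (m : Int) (PySem.List.pyRange (k : Int) (full.length : Int) 1)
      = okN (full.drop k) (m >>> k) := by
  induction n with
  | zero =>
      intro k m h
      have hk : (full.length : Int) ≤ (k : Int) := by exact_mod_cast (by omega : full.length ≤ k)
      rw [PySem.List.pyRange_one_eq_nil hk, List.drop_eq_nil_of_le (by omega)]
      rfl
  | succ n ih =>
      intro k m h
      have hk : k < full.length := by omega
      rw [PySem.List.pyRange_one_cons (by exact_mod_cast hk)]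
      have hget : PySem.List.pyGetD full (k : Int) 0 = full[k] := by
        rw [PySem.List.pyGetD_natCast, List.getD_eq_getElem _ _ hk]
      have hbe : bit_equal (m : Int) (k : Int) full[k]
          = ((((m >>> k) % 2 : Nat) : Int) == full[k]) := by
        unfold bit_equal
        rw [Int.toNat_natCast,
          show ((m : Int) >>> k) = ((m >>> k : Nat) : Int) from (Int.natCast_shiftRight m k).symm,
          show (1 : Int) = ((1 : Nat) : Int) from rfl, PySem.Int.band_natCast, Nat.and_one_is_mod]
      rw [List.drop_eq_getElem_cons hk]
      simp only [make_basis_check, okN, hget, hbe]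
      rw [show ((k : Int) + 1) = (((k + 1 : Nat)) : Int) by push_cast; ring,
        ih (k + 1) m (by omega), Nat.shiftRight_succ]
      exact if_bool_lemma (full[k] == -1) _ _

theorem make_basis_eq_filter (rs : List Int) :
    make_basis rs = ((List.range (2 ^ rs.length)).filter (okN rs)).map (fun m : Nat => (m : Int)) := by
  unfold make_basis
  rw [PySem.List.foldl_append_if_eq_filter]
  simp only [List.nil_append]
  set L := PySem.List.pyRange 0 (rs.length : Int) 1 with hL
  rw [PySem.List.pyRange_one, sub_zero,
    show (2 : Int) ^ rs.length = ((2 ^ rs.length : Nat) : Int) by push_cast; ring,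
    Int.toNat_natCast, List.filter_map]
  congr 1
  · funext k; ring
  · apply List.filter_congr
    intro k _
    simp only [Function.comp, zero_add]
    rw [hL]
    have := check_spec rs rs.length 0 k (by simp)
    simpa using this

theorem range_double (n : Nat) :
    List.range (2 * n) = (List.range n).flatMap (fun q => [2 * q, 2 * q + 1]) := by
  induction n with
  | zero => rfl
  | succ n ih =>
      rw [List.range_succ, List.flatMap_append, ← ih]
      have : 2 * (n + 1) = (2 * n + 1) + 1 := by omega
      rw [this, List.range_succ, List.range_succ]
      simp

theorem filter_flatMap' {α β : Type} (l : List α) (f : α → List β) (p : β → Bool) :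
    (l.flatMap f).filter p = l.flatMap (fun x => (f x).filter p) := by
  induction l with
  | nil => rfl
  | cons a l ih => simp [List.flatMap_cons, List.filter_append, ih]

theorem flatMap_filter {α β : Type} (l : List α) (p : α → Bool) (f : α → List β) :
    (l.filter p).flatMap f = l.flatMap (fun x => if p x then f x else []) := by
  induction l with
  | nil => rfl
  | cons a l ih => by_cases h : p a <;> simp [h, ih]

def bitsInt (r : Int) : List Int :=
  if r == -1 then [0, 1] else if r == 0 || r == 1 then [r] else []

def bitsN (r : Int) : List Nat :=
  if r == -1 then [0, 1] else if r == 0 || r == 1 then [r.toNat] else []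

theorem okN_cons_bit (r : Int) (rs : List Int) (q b : Nat) (hb : b < 2) :
    okN (r :: rs) (2 * q + b) = ((r == -1 || ((b : Nat) : Int) == r) && okN rs q) := by
  have h1 : (2 * q + b) % 2 = b := by omega
  have h2 : (2 * q + b) / 2 = q := by omega
  simp [okN, h1, h2]

theorem flatMap_congr' {α β : Type} (l : List α) (f g : α → List β) (h : ∀ a, f a = g a) :
    l.flatMap f = l.flatMap g := by
  rw [funext h]

theorem filter_pair (r : Int) (rs : List Int) (q : Nat) :
    ([2 * q, 2 * q + 1].filter (okN (r :: rs)))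
      = if okN rs q then (bitsN r).map (fun b => 2 * q + b) else [] := by
  have h0 : okN (r :: rs) (2 * q) = ((r == -1 || (0 : Int) == r) && okN rs q) := by
    simpa using okN_cons_bit r rs q 0 (by omega)
  have h1 : okN (r :: rs) (2 * q + 1) = ((r == -1 || (1 : Int) == r) && okN rs q) := by
    simpa using okN_cons_bit r rs q 1 (by omega)
  by_cases hq : okN rs q
  · rcases eq_or_ne r (-1) with hr | hr
    · subst hr; simp [h0, h1, hq, bitsN]
    · rcases eq_or_ne r 0 with hr0 | hr0
      · subst hr0; simp [h0, h1, hq, bitsN]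
      · rcases eq_or_ne r 1 with hr1 | hr1
        · subst hr1; simp [h0, h1, hq, bitsN]
        · simp [h0, h1, hq, bitsN, hr, Ne.symm hr0, Ne.symm hr1, hr0, hr1]
  · simp only [Bool.not_eq_true] at hq
    simp [h0, h1, hq]

theorem bits_cast (r : Int) (q : Nat) :
    (bitsInt r).map (fun b => 2 * (q : Int) + b)
      = ((bitsN r).map (fun b => 2 * q + b)).map (fun m : Nat => (m : Int)) := by
  rcases eq_or_ne r (-1) with hr | hr
  · subst hr; simp [bitsN, bitsInt]
  · rcases eq_or_ne r 0 with hr0 | hr0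
    · subst hr0; simp [bitsN, bitsInt]
    · rcases eq_or_ne r 1 with hr1 | hr1
      · subst hr1; simp [bitsN, bitsInt]
      · simp [bitsN, bitsInt, hr, hr0, hr1]

theorem make_basis_alt_eq_filter (rs : List Int) :
    make_basis_alt rs = ((List.range (2 ^ rs.length)).filter (okN rs)).map (fun m : Nat => (m : Int)) := by
  induction rs with
  | nil => rfl
  | cons r rs ih =>
      have hpow : 2 ^ (r :: rs).length = 2 * 2 ^ rs.length := by
        simp [List.length_cons, pow_succ, Nat.mul_comm]
      have hL : make_basis_alt (r :: rs)
          = (List.range (2 ^ rs.length)).flatMap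
              (fun q => if okN rs q then (bitsInt r).map (fun b => 2 * (q : Int) + b) else []) := by
        rw [show make_basis_alt (r :: rs)
              = (make_basis_alt rs).flatMap (fun q => (bitsInt r).map (fun b => 2 * q + b)) from rfl,
          ih, List.flatMap_map, flatMap_filter]
      have hR : ((List.range (2 ^ (r :: rs).length)).filter (okN (r :: rs))).map (fun m : Nat => (m : Int))
          = (List.range (2 ^ rs.length)).flatMap
              (fun q => (if okN rs q then (bitsN r).map (fun b => 2 * q + b) else []).map
                 (fun m : Nat => (m : Int))) := by
        rw [hpow, range_double, filter_flatMap', List.map_flatMap]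
        exact flatMap_congr' _ _ _ (fun q => by rw [filter_pair])
      rw [hL, hR]
      refine flatMap_congr' _ _ _ (fun q => ?_)
      by_cases hq : okN rs q
      · simp only [hq, if_true]
        exact bits_cast r q
      · simp [hq]

-- ===== VERDICT (by name: the statement is the Claim_ definition above) =====
theorem make_basis_spec : Claim_equal_make_basis := by
  intro rs _
  unfold Spec_make_basis
  rw [make_basis_eq_filter, make_basis_alt_eq_filter]
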